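-- pv_equiv track=rewrite | github.com/Abhrankan-Chakrabarti/almost-isosceles-pythagorean-triples | AIPT_generator.py | generate_almost_isosceles_pythagorean_triples
-- ===== SOURCE A (Python) =====
-- def generate_almost_isosceles_pythagorean_triples(num_triples):
--     x, y = 1, 1
--     count = 0
--     while count < num_triples:
--         x, y = 3*x + 4*y, 2*x + 3*y
--         a = x // 2
--         b = a + 1
--         c = y
--         yield (a, b, c)
--         count += 1
-- ===== SOURCE B (Python) =====
-- def generate_almost_isosceles_pythagorean_triples(num_triples):
--     # Maintain the last two terms of the a-sequence and of the c-sequence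
--     # instead of the (x, y) pair: a_next = 6*a - a_prev + 2, c_next = 6*c - c_prev.
--     a_prev, a = 0, 3
--     c_prev, c = 1, 5
--     for _ in range(num_triples):
--         yield (a, a + 1, c)
--         a_prev, a = a, 6*a - a_prev + 2
--         c_prev, c = c, 6*c - c_prev
-- ===== Notes on version B (the rewrite author's own statement) =====
-- stated objective: alternative
-- what changed: B drops the (x,y) helper pair entirely and instead maintains the last two terms of the leg sequence and of the hypotenuse sequence, using the second-order recurrences a_next = 6a - a_prev + 2 and c_next = 6c - c_prev over a range(num_triples) loop.
import Mathlib
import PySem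

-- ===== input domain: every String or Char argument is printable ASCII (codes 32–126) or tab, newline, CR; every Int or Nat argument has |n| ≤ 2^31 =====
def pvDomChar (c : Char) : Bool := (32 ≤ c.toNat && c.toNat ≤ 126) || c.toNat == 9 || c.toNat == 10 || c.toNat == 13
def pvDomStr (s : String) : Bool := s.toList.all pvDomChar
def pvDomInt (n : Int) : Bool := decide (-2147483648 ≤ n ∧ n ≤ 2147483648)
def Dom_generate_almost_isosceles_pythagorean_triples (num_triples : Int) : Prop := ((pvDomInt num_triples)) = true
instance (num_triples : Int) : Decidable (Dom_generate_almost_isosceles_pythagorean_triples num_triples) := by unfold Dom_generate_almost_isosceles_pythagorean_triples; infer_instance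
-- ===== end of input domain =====

-- B replaces A's (x,y) state pair by the previous two terms of the a- and c-sequences
-- (second-order recurrences); alternative decomposition, same cost.

-- ===== PORT A =====
-- while count < num_triples: x,y = 3x+4y, 2x+3y; yield (x//2, x//2+1, y)
def pvLoopA (num_triples x y count : Int) : List (Int × Int × Int) :=
  if _h : count < num_triples then
    let x' := 3*x + 4*y
    let y' := 2*x + 3*y
    let a := PySem.Int.floordiv x' 2
    (a, a + 1, y') :: pvLoopA num_triples x' y' (count + 1)
  else []
termination_by (num_triples - count).toNat
decreasing_by omega

def generate_almost_isosceles_pythagorean_triples (num_triples : Int) : List (Int × Int × Int) :=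
  pvLoopA num_triples 1 1 0

-- ===== PORT B =====
-- for _ in range(num_triples): yield (a, a+1, c); advance the two second-order recurrences
def pvLoopB : Nat → Int → Int → Int → Int → List (Int × Int × Int)
  | 0, _, _, _, _ => []
  | k + 1, a_prev, a, c_prev, c =>
    (a, a + 1, c) :: pvLoopB k a (6*a - a_prev + 2) c (6*c - c_prev)

def generate_almost_isosceles_pythagorean_triples_alt (num_triples : Int) : List (Int × Int × Int) :=
  pvLoopB num_triples.toNat 0 3 1 5

-- ===== PRECONDITION & SPEC =====
def Spec_generate_almost_isosceles_pythagorean_triples (num_triples : Int) (out : List (Int × Int × Int)) : Prop := out = generate_almost_isosceles_pythagorean_triples_alt num_triples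
instance (num_triples : Int) (out : List (Int × Int × Int)) : Decidable (Spec_generate_almost_isosceles_pythagorean_triples num_triples out) := by unfold Spec_generate_almost_isosceles_pythagorean_triples; infer_instance

-- ===== CLAIM (what is proved, stated in full; the proofs are below) =====
def Claim_equal_generate_almost_isosceles_pythagorean_triples : Prop := ∀ (num_triples : Int), Dom_generate_almost_isosceles_pythagorean_triples num_triples → Spec_generate_almost_isosceles_pythagorean_triples num_triples (generate_almost_isosceles_pythagorean_triples num_triples)

-- ===== LEMMAS AND PROOFS =====

-- A's x stays odd; with x odd, (3x+4y)//2 = (3x+4y-1)/2 exactly, and the two states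
-- are linked by a_prev = (x-1)/2, a = (3x+4y-1)/2, c_prev = y, c = 2x+3y.
theorem pvLoop_agree : ∀ (f : Nat) (num count x y : Int),
    (num - count).toNat = f → x % 2 = 1 →
    pvLoopA num x y count =
      pvLoopB f ((x - 1) / 2) ((3*x + 4*y - 1) / 2) y (2*x + 3*y) := by
  intro f
  induction f with
  | zero =>
    intro num count x y hf _
    rw [pvLoopA]
    simp only [pvLoopB]
    have : ¬ count < num := by omega
    simp [this]
  | succ k ih =>
    intro num count x y hf hx
    have hlt : count < num := by omega
    rw [pvLoopA]
    simp only [hlt, dif_pos, pvLoopB]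
    have hodd : (3*x + 4*y) % 2 = 1 := by omega
    have hfd : PySem.Int.floordiv (3*x + 4*y) 2 = (3*x + 4*y - 1) / 2 := by
      rw [PySem.Int.floordiv_eq_ediv_of_pos (by omega)]
      omega
    have hrec := ih num (count + 1) (3*x + 4*y) (2*x + 3*y) (by omega) hodd
    rw [hfd, hrec]
    have e1 : (3*(3*x + 4*y) + 4*(2*x + 3*y) - 1) / 2
        = 6*((3*x + 4*y - 1) / 2) - (x - 1) / 2 + 2 := by omega
    have e2 : 2*(3*x + 4*y) + 3*(2*x + 3*y) = 6*(2*x + 3*y) - y := by ring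
    rw [e1, e2]

-- ===== VERDICT (by name: the statement is the Claim_ definition above) =====
theorem generate_almost_isosceles_pythagorean_triples_spec : Claim_equal_generate_almost_isosceles_pythagorean_triples := by
  intro num_triples _
  unfold Spec_generate_almost_isosceles_pythagorean_triples
  unfold generate_almost_isosceles_pythagorean_triples generate_almost_isosceles_pythagorean_triples_alt
  have := pvLoop_agree num_triples.toNat num_triples 0 1 1 (by omega) (by decide)
  simpa using this
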